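-- pv_equiv track=rewrite | github.com/warriorguo/ozx_image_atlas | backend/shadow_matching.py | strip_shadow_suffix
-- ===== SOURCE A (Python) =====
-- def strip_shadow_suffix(filename: str) -> str:
--     """Remove shadow-related suffixes from filename"""
--     suffixes = ['__shadow', '_shadow', '-shadow', '(shadow)', 'shadow']  # Longest first
--     name = filename
--
--     for suffix in suffixes:
--         if name.endswith(suffix):
--             name = name[:-len(suffix)]
--             break
--
--     return name
-- ===== SOURCE B (Python) =====
-- def strip_shadow_suffix(filename: str) -> str:
--     """Remove shadow-related suffixes from filename"""
--     # Strip the common 'shadow' stem once, then strip the longest separator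
--     # that precedes it ('__' > '_' / '-'); '(shadow)' is its own case.
--     if filename.endswith('(shadow)'):
--         return filename[:-8]
--     if not filename.endswith('shadow'):
--         return filename
--     rest = filename[:-6]
--     if rest.endswith('__'):
--         return rest[:-2]
--     if rest.endswith('_') or rest.endswith('-'):
--         return rest[:-1]
--     return rest
-- ===== Notes on version B (the rewrite author's own statement) =====
-- stated objective: alternative
-- what changed: Replaces the scan over a longest-first suffix list with a direct case split: strip the common 'shadow' stem once, then strip the longest separator ('__', '_' or '-') left before it, with '(shadow)' handled as its own case.
import Mathlib
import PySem

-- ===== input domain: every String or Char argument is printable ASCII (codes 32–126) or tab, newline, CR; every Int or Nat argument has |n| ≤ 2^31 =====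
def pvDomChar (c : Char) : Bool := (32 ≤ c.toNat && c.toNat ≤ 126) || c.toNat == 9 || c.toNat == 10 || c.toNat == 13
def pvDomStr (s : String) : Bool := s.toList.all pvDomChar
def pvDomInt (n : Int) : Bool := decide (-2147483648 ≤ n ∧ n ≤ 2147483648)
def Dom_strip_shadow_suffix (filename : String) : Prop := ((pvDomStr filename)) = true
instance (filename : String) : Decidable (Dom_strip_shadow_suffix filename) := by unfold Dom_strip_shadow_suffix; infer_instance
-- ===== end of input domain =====

-- B replaces A's scan over a longest-first suffix list by a direct case split: strip the
-- common "shadow" stem once, then strip the longest separator left before it ("__" > "_"/"-"),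
-- with "(shadow)" as its own case; alternative structure, same cost.


-- ===== PORT A =====
-- 'for suffix in suffixes: if name.endswith(suffix): name = name[:-len(suffix)]; break'
def pvStripLoop (name : String) : List String → String
  | [] => name
  | suf :: rest =>
    if PySem.Str.endswith name suf then
      PySem.Str.slice name none (some (-(PySem.Str.len suf : Int)))
    else pvStripLoop name rest

def strip_shadow_suffix (filename : String) : String :=
  pvStripLoop filename ["__shadow", "_shadow", "-shadow", "(shadow)", "shadow"]

-- ===== PORT B =====
def strip_shadow_suffix_alt (filename : String) : String :=
  if PySem.Str.endswith filename "(shadow)" then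
    PySem.Str.slice filename none (some (-8))
  else if !PySem.Str.endswith filename "shadow" then
    filename
  else
    let rest := PySem.Str.slice filename none (some (-6))
    if PySem.Str.endswith rest "__" then PySem.Str.slice rest none (some (-2))
    else if PySem.Str.endswith rest "_" || PySem.Str.endswith rest "-" then
      PySem.Str.slice rest none (some (-1))
    else rest

-- ===== PRECONDITION & SPEC =====
def Spec_strip_shadow_suffix (filename : String) (out : String) : Prop := out = strip_shadow_suffix_alt filename
instance (filename : String) (out : String) : Decidable (Spec_strip_shadow_suffix filename out) := by unfold Spec_strip_shadow_suffix; infer_instance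

-- ===== CLAIM (what is proved, stated in full; the proofs are below) =====
def Claim_equal_strip_shadow_suffix : Prop := ∀ (filename : String), Dom_strip_shadow_suffix filename → Spec_strip_shadow_suffix filename (strip_shadow_suffix filename)

-- ===== LEMMAS AND PROOFS =====

-- appending a common tail reflects the suffix relation
theorem pv_suffix_append_right {α : Type} (u t v : List α) :
    (u ++ v) <:+ (t ++ v) → u <:+ t := by
  rintro ⟨w, hw⟩
  rw [← List.append_assoc] at hw
  exact ⟨w, List.append_cancel_right hw⟩

-- taking all but the suffix's length recovers the front part
theorem pv_take_ks (t u : List Char) (k : Nat) (hk : u.length = k) :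
    (t ++ u).take ((t ++ u).length - k) = t := by
  subst hk
  have h : (t ++ u).length - u.length = t.length := by simp
  rw [h, List.take_left]

-- a list incomparable (as suffix) with a known suffix v of s is not itself a suffix of s
theorem pv_not_suffix {u v s : List Char}
    (hv : v <:+ s) (h1 : ¬ u <:+ v) (h2 : ¬ v <:+ u) : ¬ u <:+ s := by
  intro hu
  rcases List.suffix_or_suffix_of_suffix hu hv with h | h
  · exact h1 h
  · exact h2 h

theorem pv_strip8 (t u : List Char) (h : u.length = 8) :
    PySem.List.slice (t ++ u) none (some (-8)) = t := by
  rw [PySem.List.slice_to_neg_ofNat _ 8 (by omega)]; exact pv_take_ks t u 8 h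

theorem pv_strip7 (t u : List Char) (h : u.length = 7) :
    PySem.List.slice (t ++ u) none (some (-7)) = t := by
  rw [PySem.List.slice_to_neg_ofNat _ 7 (by omega)]; exact pv_take_ks t u 7 h

theorem pv_strip6 (t u : List Char) (h : u.length = 6) :
    PySem.List.slice (t ++ u) none (some (-6)) = t := by
  rw [PySem.List.slice_to_neg_ofNat _ 6 (by omega)]; exact pv_take_ks t u 6 h

theorem pv_strip2 (t u : List Char) (h : u.length = 2) :
    PySem.List.slice (t ++ u) none (some (-2)) = t := by
  rw [PySem.List.slice_to_neg_ofNat _ 2 (by omega)]; exact pv_take_ks t u 2 h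

theorem strip_shadow_main (filename : String) :
    strip_shadow_suffix filename = strip_shadow_suffix_alt filename := by
  unfold strip_shadow_suffix strip_shadow_suffix_alt
  simp only [pvStripLoop]
  rw [← String.toList_inj]
  simp only [apply_ite String.toList, Bool.not_eq_true', Bool.eq_false_iff, ne_eq]
  simp only [pysem]
  by_cases h1 : "__shadow".toList <:+ filename.toList
  · -- ends with "__shadow": A strips 8, B strips "shadow" then "__"
    obtain ⟨t, ht⟩ := h1
    have ht2 : (t ++ "__".toList) ++ "shadow".toList = filename.toList := by
      rw [← ht, List.append_assoc]
      exact congrArg (t ++ ·) (by decide)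
    have h4f : ¬ "(shadow)".toList <:+ filename.toList := by
      rw [← ht]
      exact pv_not_suffix (List.suffix_append t _) (by decide) (by decide)
    have h5 : "shadow".toList <:+ filename.toList := ⟨t ++ "__".toList, ht2⟩
    have hrest : PySem.List.slice filename.toList none (some (-6)) = t ++ "__".toList := by
      rw [← ht2]; exact pv_strip6 _ _ (by decide)
    rw [if_pos ⟨t, ht⟩, if_neg h4f, if_neg (not_not_intro h5), hrest,
      if_pos (List.suffix_append t _),
      show (-("__shadow".toList.length : Int)) = -8 from by decide,
      ← ht, pv_strip8 t _ (by decide), pv_strip2 t _ (by decide)]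
  by_cases h2 : "_shadow".toList <:+ filename.toList
  · -- ends with "_shadow" (not "__shadow"): A strips 7, B strips "shadow" then "_"
    obtain ⟨t, ht⟩ := h2
    have ht2 : (t ++ "_".toList) ++ "shadow".toList = filename.toList := by
      rw [← ht, List.append_assoc]
      exact congrArg (t ++ ·) (by decide)
    have h4f : ¬ "(shadow)".toList <:+ filename.toList := by
      rw [← ht]
      exact pv_not_suffix (List.suffix_append t _) (by decide) (by decide)
    have h5 : "shadow".toList <:+ filename.toList := ⟨t ++ "_".toList, ht2⟩
    have hrest : PySem.List.slice filename.toList none (some (-6)) = t ++ "_".toList := by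
      rw [← ht2]; exact pv_strip6 _ _ (by decide)
    have hdd : ¬ "__".toList <:+ t ++ "_".toList := by
      intro hc
      apply h1
      have h' : ['_'] <:+ t :=
        pv_suffix_append_right ['_'] t ['_'] (by exact hc)
      obtain ⟨w, hw⟩ := h'
      refine ⟨w, ?_⟩
      rw [← ht, ← hw, List.append_assoc]
      exact congrArg (w ++ ·) (by decide)
    have hor : (PySem.Chars.endswith (t ++ "_".toList) "_".toList ||
        PySem.Chars.endswith (t ++ "_".toList) "-".toList) = true := by
      rw [Bool.or_eq_true]
      exact Or.inl ((PySem.Chars.endswith_iff _ _).mpr (List.suffix_append t _))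
    rw [if_neg h1, if_pos ⟨t, ht⟩, if_neg h4f, if_neg (not_not_intro h5), hrest,
      if_neg hdd, if_pos hor,
      show (-("_shadow".toList.length : Int)) = -7 from by decide,
      ← ht, pv_strip7 t _ (by decide)]
    simp
  by_cases h3 : "-shadow".toList <:+ filename.toList
  · -- ends with "-shadow": A strips 7, B strips "shadow" then "-"
    obtain ⟨t, ht⟩ := h3
    have ht2 : (t ++ "-".toList) ++ "shadow".toList = filename.toList := by
      rw [← ht, List.append_assoc]
      exact congrArg (t ++ ·) (by decide)
    have h4f : ¬ "(shadow)".toList <:+ filename.toList := by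
      rw [← ht]
      exact pv_not_suffix (List.suffix_append t _) (by decide) (by decide)
    have h5 : "shadow".toList <:+ filename.toList := ⟨t ++ "-".toList, ht2⟩
    have hrest : PySem.List.slice filename.toList none (some (-6)) = t ++ "-".toList := by
      rw [← ht2]; exact pv_strip6 _ _ (by decide)
    have hdd : ¬ "__".toList <:+ t ++ "-".toList :=
      pv_not_suffix (List.suffix_append t "-".toList) (by decide) (by decide)
    have hor : (PySem.Chars.endswith (t ++ "-".toList) "_".toList ||
        PySem.Chars.endswith (t ++ "-".toList) "-".toList) = true := by
      rw [Bool.or_eq_true]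
      exact Or.inr ((PySem.Chars.endswith_iff _ _).mpr (List.suffix_append t _))
    rw [if_neg h1, if_neg h2, if_pos ⟨t, ht⟩, if_neg h4f, if_neg (not_not_intro h5), hrest,
      if_neg hdd, if_pos hor,
      show (-("-shadow".toList.length : Int)) = -7 from by decide,
      ← ht, pv_strip7 t _ (by decide)]
    simp
  by_cases h4 : "(shadow)".toList <:+ filename.toList
  · -- ends with "(shadow)": both strip 8
    obtain ⟨t, ht⟩ := h4
    rw [if_neg h1, if_neg h2, if_neg h3, if_pos ⟨t, ht⟩, if_pos ⟨t, ht⟩,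
      show (-("(shadow)".toList.length : Int)) = -8 from by decide,
      ← ht, pv_strip8 t _ (by decide)]
  by_cases h5 : "shadow".toList <:+ filename.toList
  · -- ends with plain "shadow", no separator before it: both strip 6
    obtain ⟨t, ht⟩ := h5
    have hrest : PySem.List.slice filename.toList none (some (-6)) = t := by
      rw [← ht]; exact pv_strip6 _ _ (by decide)
    have hdd : ¬ "__".toList <:+ t := by
      intro hc
      obtain ⟨w, hw⟩ := hc
      apply h1
      refine ⟨w, ?_⟩
      rw [← ht, ← hw, List.append_assoc]
      exact congrArg (w ++ ·) (by decide)
    have hor : ¬ (PySem.Chars.endswith t "_".toList ||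
        PySem.Chars.endswith t "-".toList) = true := by
      rw [Bool.or_eq_true]
      rintro (hc | hc)
      · obtain ⟨w, hw⟩ := (PySem.Chars.endswith_iff _ _).mp hc
        apply h2
        refine ⟨w, ?_⟩
        rw [← ht, ← hw, List.append_assoc]
        exact congrArg (w ++ ·) (by decide)
      · obtain ⟨w, hw⟩ := (PySem.Chars.endswith_iff _ _).mp hc
        apply h3
        refine ⟨w, ?_⟩
        rw [← ht, ← hw, List.append_assoc]
        exact congrArg (w ++ ·) (by decide)
    rw [if_neg h1, if_neg h2, if_neg h3, if_neg h4, if_pos ⟨t, ht⟩, if_neg h4,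
      if_neg (not_not_intro ⟨t, ht⟩), hrest, if_neg hdd, if_neg hor,
      show (-("shadow".toList.length : Int)) = -6 from by decide,
      ← ht, pv_strip6 t _ (by decide)]
  · -- no shadow suffix at all: both return the input unchanged
    rw [if_neg h1, if_neg h2, if_neg h3, if_neg h4, if_neg h5, if_neg h4, if_pos h5]

-- ===== VERDICT (by name: the statement is the Claim_ definition above) =====
theorem strip_shadow_suffix_spec : Claim_equal_strip_shadow_suffix := by
  intro filename _
  unfold Spec_strip_shadow_suffix
  exact strip_shadow_main filename
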